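-- pv_equiv track=rewrite | github.com/aimof/tic_tac_toe_ai_py | myTicTacToe/ai1/ai1module.py | search_check
-- ===== SOURCE A (Python) =====
-- def is_check(b, lines):
--     my_check = []
--     opponents_check = []
--     for line in lines:
--         play_sum = b[line[0]] + b[line[1]] + b[line[2]]
--         if play_sum == 2:
--             my_check.append(line)
--         if play_sum == -2:
--             opponents_check.append(line)
--     return my_check, opponents_check
--
-- def search_check(b, lines):
--     my_checks = []
--     opponents_checks = []
--     for _ in range(9):
--         tmp = is_check(b, lines)
--         my_check = tmp[0]
--         opponents_check = tmp[1]
--         my_checks.append(my_check)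
--         opponents_checks.append(opponents_check)
--     return my_checks, opponents_checks
-- ===== SOURCE B (Python) =====
-- def search_check(b, lines):
--     my_check = [line for line in lines
--                 if b[line[0]] + b[line[1]] + b[line[2]] == 2]
--     opponents_check = [line for line in lines
--                        if b[line[0]] + b[line[1]] + b[line[2]] == -2]
--     return ([list(my_check) for _ in range(9)],
--             [list(opponents_check) for _ in range(9)])
-- ===== Notes on version B (the rewrite author's own statement) =====
-- stated objective: simpler
-- what changed: B scans the lines once (two comprehensions) and builds the nine identical entries by copying that single result, instead of re-running is_check's full scan nine times.
import Mathlib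
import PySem

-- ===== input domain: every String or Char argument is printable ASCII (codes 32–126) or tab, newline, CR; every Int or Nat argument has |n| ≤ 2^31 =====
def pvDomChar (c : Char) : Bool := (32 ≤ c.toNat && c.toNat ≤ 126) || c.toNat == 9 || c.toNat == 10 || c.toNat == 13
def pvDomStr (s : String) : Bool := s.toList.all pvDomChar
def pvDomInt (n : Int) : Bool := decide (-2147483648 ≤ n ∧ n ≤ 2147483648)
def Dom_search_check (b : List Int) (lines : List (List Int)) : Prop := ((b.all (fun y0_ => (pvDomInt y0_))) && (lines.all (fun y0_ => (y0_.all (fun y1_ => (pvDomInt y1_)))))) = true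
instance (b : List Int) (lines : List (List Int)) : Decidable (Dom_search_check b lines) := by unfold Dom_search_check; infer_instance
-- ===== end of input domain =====

-- B scans the lines once and replicates the result nine times instead of re-running the scan nine times; return values proved equal.
-- b[line[k]]: line[k] then b[...] with Python indexing; total via getD 0, exact under Pre_ (which rules out IndexError).
def pvBLine (b line : List Int) (k : Int) : Int :=
  ((PySem.List.pyGet? line k).bind (fun i => PySem.List.pyGet? b i)).getD 0

-- ===== PORT A =====
def is_check (b : List Int) (lines : List (List Int)) : List (List Int) × List (List Int) :=
  lines.foldl (fun acc line =>
    let play_sum := pvBLine b line 0 + pvBLine b line 1 + pvBLine b line 2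
    let acc1 := if play_sum = 2 then (acc.1 ++ [line], acc.2) else acc
    if play_sum = -2 then (acc1.1, acc1.2 ++ [line]) else acc1) ([], [])

def search_check (b : List Int) (lines : List (List Int)) : List (List (List Int)) × List (List (List Int)) :=
  (PySem.List.pyRange 0 9 1).foldl (fun acc _ =>
    let tmp := is_check b lines
    (acc.1 ++ [tmp.1], acc.2 ++ [tmp.2])) ([], [])

-- ===== PORT B =====
def search_check_alt (b : List Int) (lines : List (List Int)) : List (List (List Int)) × List (List (List Int)) :=
  let my_check := lines.filter (fun line =>
    pvBLine b line 0 + pvBLine b line 1 + pvBLine b line 2 == 2)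
  let opponents_check := lines.filter (fun line =>
    pvBLine b line 0 + pvBLine b line 1 + pvBLine b line 2 == -2)
  ((List.range 9).map (fun _ => my_check), (List.range 9).map (fun _ => opponents_check))

-- ===== PRECONDITION & SPEC =====
-- Pre_ excludes exactly the inputs where Python A raises IndexError: some line has fewer than
-- 3 entries, or one of its first three entries is not a valid Python index into b.
def Pre_search_check (b : List Int) (lines : List (List Int)) : Prop :=
  ∀ line ∈ lines, 3 ≤ line.length ∧ ∀ i ∈ line.take 3, PySem.Raise.InRange b.length i
instance (b : List Int) (lines : List (List Int)) : Decidable (Pre_search_check b lines) := by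
  unfold Pre_search_check; infer_instance

def pvWitness_search_check : List Int × List (List Int) :=
  ([1, 1, 0, -1, -1, 0, 0, 0, 0], [[0, 1, 2], [3, 4, 5], [0, 3, 6]])

def Spec_search_check (b : List Int) (lines : List (List Int)) (out : List (List (List Int)) × List (List (List Int))) : Prop := out = search_check_alt b lines
instance (b : List Int) (lines : List (List Int)) (out : List (List (List Int)) × List (List (List Int))) : Decidable (Spec_search_check b lines out) := by unfold Spec_search_check; infer_instance

-- ===== CLAIM (what is proved, stated in full; the proofs are below) =====
def Claim_equal_search_check : Prop := ∀ (b : List Int) (lines : List (List Int)), Dom_search_check b lines → Pre_search_check b lines → Spec_search_check b lines (search_check b lines)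

-- ===== LEMMAS AND PROOFS =====
theorem is_check_eq_filter (b : List Int) (lines : List (List Int)) (a1 a2 : List (List Int)) :
    lines.foldl (fun acc line =>
      let play_sum := pvBLine b line 0 + pvBLine b line 1 + pvBLine b line 2
      let acc1 := if play_sum = 2 then (acc.1 ++ [line], acc.2) else acc
      if play_sum = -2 then (acc1.1, acc1.2 ++ [line]) else acc1) (a1, a2)
    = (a1 ++ lines.filter (fun line =>
         pvBLine b line 0 + pvBLine b line 1 + pvBLine b line 2 == 2),
       a2 ++ lines.filter (fun line =>
         pvBLine b line 0 + pvBLine b line 1 + pvBLine b line 2 == -2)) := by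
  induction lines generalizing a1 a2 with
  | nil => simp
  | cons l ls ih =>
    simp only [List.foldl_cons, List.filter_cons]
    by_cases h2 : pvBLine b l 0 + pvBLine b l 1 + pvBLine b l 2 = 2 <;>
      by_cases hm : pvBLine b l 0 + pvBLine b l 1 + pvBLine b l 2 = -2 <;>
        simp [h2, hm, ih]

theorem search_check_eq_alt (b : List Int) (lines : List (List Int)) :
    search_check b lines = search_check_alt b lines := by
  have h : is_check b lines
      = (lines.filter (fun line =>
           pvBLine b line 0 + pvBLine b line 1 + pvBLine b line 2 == 2),
         lines.filter (fun line =>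
           pvBLine b line 0 + pvBLine b line 1 + pvBLine b line 2 == -2)) := by
    simpa using is_check_eq_filter b lines [] []
  unfold search_check search_check_alt
  rw [show PySem.List.pyRange 0 9 1 = [0,1,2,3,4,5,6,7,8] from by decide]
  simp [h, List.range_succ]

-- ===== VERDICT (by name: the statement is the Claim_ definition above) =====
theorem search_check_spec : Claim_equal_search_check := by
  intro b lines _ _
  exact search_check_eq_alt b lines
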